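-- pv_equiv track=rewrite | github.com/aldenirsrv/CONTENT-BUILDER | fill_carousel.py | parse_post
-- ===== SOURCE A (Python) =====
-- SECTIONS = ["HOOK", "HOOK_SUB", "STORY", "INSIGHT", "VALUE", "CTA"]
--
-- def parse_post(post_text: str):
--     """Parse post sections like [HOOK], [STORY], etc."""
--     parts = {}
--     current = None
--     for line in post_text.splitlines():
--         line = line.strip()
--         tag = line.strip("[]").upper()
--         if tag in SECTIONS:
--             current = tag
--             parts[current] = []
--         elif current and line:
--             parts[current].append(line)
--     return parts
-- ===== SOURCE B (Python) =====
-- SECTIONS = ["HOOK", "HOOK_SUB", "STORY", "INSIGHT", "VALUE", "CTA"]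
--
--
-- def parse_post(post_text: str):
--     """Parse post sections like [HOOK], [STORY], etc.
--
--     Block decomposition: strip all lines up front, drop the prefix before the
--     first header, then consume one whole header+body block at a time,
--     assigning each block's body list in a single dict store (a repeated
--     header overwrites, matching the reset)."""
--     lines = [l.strip() for l in post_text.splitlines()]
--
--     def is_hdr(l):
--         return l.strip("[]").upper() in SECTIONS
--
--     rest = lines
--     while rest and not is_hdr(rest[0]):
--         rest = rest[1:]
--     parts = {}
--     while rest:
--         tag = rest[0].strip("[]").upper()
--         rest = rest[1:]
--         body = []
--         while rest and not is_hdr(rest[0]):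
--             if rest[0]:
--                 body.append(rest[0])
--             rest = rest[1:]
--         parts[tag] = body
--     return parts
-- ===== Notes on version B (the rewrite author's own statement) =====
-- stated objective: alternative
-- what changed: Replaces A's single interleaved fold with a current-section state variable and per-line dict appends by a block decomposition: drop the pre-header prefix, then consume each header+body block wholesale and store its body list with one dict assignment per block.
import Mathlib
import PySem

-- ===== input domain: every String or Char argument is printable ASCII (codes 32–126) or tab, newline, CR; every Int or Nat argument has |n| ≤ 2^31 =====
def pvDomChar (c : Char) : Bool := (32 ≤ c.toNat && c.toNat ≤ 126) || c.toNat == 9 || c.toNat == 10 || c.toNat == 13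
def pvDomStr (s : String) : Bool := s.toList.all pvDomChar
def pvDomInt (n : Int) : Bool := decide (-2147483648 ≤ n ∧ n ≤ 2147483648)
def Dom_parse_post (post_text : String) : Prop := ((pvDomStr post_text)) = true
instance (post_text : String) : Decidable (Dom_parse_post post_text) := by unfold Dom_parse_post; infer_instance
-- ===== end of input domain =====

-- B replaces A's interleaved fold (dict plus current-section state, per-line appends) by a block
-- decomposition (skip prefix, then one dict store per header block): alternative, same cost.


-- ===== PORT A =====
def SECTIONS : List String := ["HOOK", "HOOK_SUB", "STORY", "INSIGHT", "VALUE", "CTA"]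

-- the loop body of A, applied to the already-stripped line (A does `line = line.strip()` first)
def pvStepA (st : PySem.Dict String (List String) × Option String) (line : String) :
    PySem.Dict String (List String) × Option String :=
  let tag := PySem.Str.upper (PySem.Str.stripChars line "[]")
  if tag ∈ SECTIONS then (st.1.insert tag [], some tag)
  else
    match st.2 with
    | some current => if line ≠ "" then (st.1.modify current [] (· ++ [line]), st.2) else st
    | none => st

def parse_post (post_text : String) : List (String × List String) :=
  (((PySem.Str.splitlines post_text).foldl
      (fun st raw => pvStepA st (PySem.Str.strip raw))
      (PySem.Dict.empty, none)).1).items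

-- ===== PORT B =====
def pvIsHdr (l : String) : Bool :=
  decide (PySem.Str.upper (PySem.Str.stripChars l "[]") ∈ SECTIONS)

-- first while loop of B: drop lines before the first header
def pvSkip : List String → List String
  | [] => []
  | l :: ls => if pvIsHdr l then l :: ls else pvSkip ls

-- inner while loop of B: collect the nonempty body lines up to the next header
def pvTakeBody : List String → List String → List String × List String
  | [], acc => (acc, [])
  | l :: ls, acc =>
    if pvIsHdr l then (acc, l :: ls)
    else pvTakeBody ls (if l ≠ "" then acc ++ [l] else acc)

theorem pvTakeBody_len : ∀ (ls acc : List String), (pvTakeBody ls acc).2.length ≤ ls.length := by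
  intro ls
  induction ls with
  | nil => intro acc; simp [pvTakeBody]
  | cons l ls ih =>
    intro acc
    simp only [pvTakeBody]
    split
    · simp
    · exact Nat.le_succ_of_le (ih _)

-- outer while loop of B: one dict store per header block
def pvBlocks : List String → PySem.Dict String (List String) → PySem.Dict String (List String)
  | [], d => d
  | l :: ls, d =>
    let tag := PySem.Str.upper (PySem.Str.stripChars l "[]")
    let br := pvTakeBody ls []
    pvBlocks br.2 (d.insert tag br.1)
termination_by ls => ls.length
decreasing_by
  exact Nat.lt_succ_of_le (pvTakeBody_len ls [])

def parse_post_alt (post_text : String) : List (String × List String) :=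
  (pvBlocks (pvSkip ((PySem.Str.splitlines post_text).map PySem.Str.strip)) PySem.Dict.empty).items

-- ===== PRECONDITION & SPEC =====
def Spec_parse_post (post_text : String) (out : List (String × List String)) : Prop := out = parse_post_alt post_text
instance (post_text : String) (out : List (String × List String)) : Decidable (Spec_parse_post post_text out) := by unfold Spec_parse_post; infer_instance

-- ===== CLAIM (what is proved, stated in full; the proofs are below) =====
def Claim_equal_parse_post : Prop := ∀ (post_text : String), Dom_parse_post post_text → Spec_parse_post post_text (parse_post post_text)

-- ===== LEMMAS AND PROOFS =====

-- modify on a key just inserted collapses to a single insert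
theorem pv_modify_insert_self (d : PySem.Dict String (List String)) (k : String)
    (v : List String) (f : List String → List String) :
    (d.insert k v).modify k [] f = d.insert k (f v) := by
  unfold PySem.Dict.modify
  rw [PySem.Dict.getD_insert_self, PySem.Dict.insert_insert_self]

-- A's fold while a current section t is open, whose body so far is acc
theorem pv_fold_some : ∀ (lines acc : List String) (d : PySem.Dict String (List String)) (t : String),
    (lines.foldl pvStepA (d.insert t acc, some t)).1 =
      pvBlocks (pvTakeBody lines acc).2 (d.insert t (pvTakeBody lines acc).1) := by
  intro lines
  induction lines with
  | nil => intro acc d t; simp [pvTakeBody, pvBlocks]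
  | cons l ls ih =>
    intro acc d t
    by_cases h : PySem.Str.upper (PySem.Str.stripChars l "[]") ∈ SECTIONS
    · have hh : pvIsHdr l = true := by simp [pvIsHdr, h]
      simp only [List.foldl_cons, pvStepA, pvTakeBody, hh, if_pos h, if_true]
      rw [ih [] (d.insert t acc) _]
      conv_rhs => rw [pvBlocks]
    · have hh : pvIsHdr l = false := by simp [pvIsHdr, h]
      simp only [List.foldl_cons, pvStepA, pvTakeBody, hh, if_neg h, Bool.false_eq_true,
        if_false]
      by_cases he : l = ""
      · simp only [he, ne_eq, not_true_eq_false, if_false]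
        exact ih acc d t
      · simp only [ne_eq, he, not_false_eq_true, if_true]
        rw [pv_modify_insert_self]
        exact ih (acc ++ [l]) d t
-- A's fold before any header has been seen
theorem pv_fold_none : ∀ (lines : List String) (d : PySem.Dict String (List String)),
    (lines.foldl pvStepA (d, none)).1 = pvBlocks (pvSkip lines) d := by
  intro lines
  induction lines with
  | nil => simp [pvSkip, pvBlocks]
  | cons l ls ih =>
    intro d
    by_cases h : PySem.Str.upper (PySem.Str.stripChars l "[]") ∈ SECTIONS
    · have hh : pvIsHdr l = true := by simp [pvIsHdr, h]
      simp only [List.foldl_cons, pvStepA, pvSkip, hh, if_pos h, if_true]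
      rw [pv_fold_some ls [] d _]
      conv_rhs => rw [pvBlocks]
    · have hh : pvIsHdr l = false := by simp [pvIsHdr, h]
      simp only [List.foldl_cons, pvStepA, pvSkip, hh, if_neg h, Bool.false_eq_true, if_false]
      exact ih d

-- ===== VERDICT (by name: the statement is the Claim_ definition above) =====
theorem parse_post_spec : Claim_equal_parse_post := by
  intro post_text _
  unfold Spec_parse_post parse_post parse_post_alt
  rw [← List.foldl_map, pv_fold_none]
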